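-- pv_equiv track=rewrite | github.com/nickiscool0301/dumb-core | dummy/base.py | convert_baseneg2
-- ===== SOURCE A (Python) =====
-- def convert_baseneg2(n: int) -> str:
--     if n == 0:
--         return "0"
--
--     res = []
--     while n != 0:
--         r = n % (-2)
--         n = n // (-2)
--
--         if r < 0:
--             r += 2
--             n += 1
--         res.append(str(r))
--     return "".join(reversed(res))
-- ===== SOURCE B (Python) =====
-- def convert_baseneg2(n: int) -> str:
--     # Schroeppel's negabinary trick: no per-digit loop.
--     k = n.bit_length() + 4
--     mask = (4 ** k - 1) // 3 * 2   # 0b1010...10 with k one-bits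
--     return bin((n + mask) ^ mask)[2:]
-- ===== Notes on version B (the rewrite author's own statement) =====
-- stated objective: alternative
-- what changed: Replaced the per-digit divmod loop by Schroeppel's closed-form negabinary trick: y = (n + M) ^ M for an alternating 0b1010...10 mask derived from n.bit_length(), then one bin() formatting call.
import Mathlib
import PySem

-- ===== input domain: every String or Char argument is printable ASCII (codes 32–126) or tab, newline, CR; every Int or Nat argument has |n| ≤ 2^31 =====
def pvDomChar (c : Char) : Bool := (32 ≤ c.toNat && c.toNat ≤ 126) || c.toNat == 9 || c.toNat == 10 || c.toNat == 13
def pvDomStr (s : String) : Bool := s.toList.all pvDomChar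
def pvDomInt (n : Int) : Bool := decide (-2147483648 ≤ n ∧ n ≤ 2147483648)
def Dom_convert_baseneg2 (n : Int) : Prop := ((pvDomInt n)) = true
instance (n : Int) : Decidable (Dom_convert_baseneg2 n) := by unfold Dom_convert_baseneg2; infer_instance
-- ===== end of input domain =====

-- B replaces A's per-digit divmod loop by Schroeppel's closed-form negabinary trick
-- (y = (n + M) ^ M with an alternating mask, then one binary-formatting call).

-- ===== PORT A =====

-- one iteration of A's while-loop body: r = n % -2; n = n // -2; adjust if r < 0; returns (digit, next n)
def pvStep (n : Int) : Int × Int :=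
  if PySem.Int.mod n (-2) < 0 then (PySem.Int.mod n (-2) + 2, PySem.Int.floordiv n (-2) + 1)
  else (PySem.Int.mod n (-2), PySem.Int.floordiv n (-2))

-- the loop decreases this measure (proved in pvStep_decr below the claim block; cited by name here)
theorem pvStep_decr (n : Int) (h : n ≠ 0) :
    2 * (pvStep n).2.natAbs + (if (pvStep n).2 < 0 then 1 else 0) <
      2 * n.natAbs + (if n < 0 then 1 else 0) := by
  have hb := PySem.Int.mod_neg_bounds n (b := -2) (by norm_num)
  have he := PySem.Int.floordiv_mul_add_mod n (-2)
  unfold pvStep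
  split_ifs with h1 <;> simp only <;> omega

-- A's while-loop, accumulating res (Python: res.append(str(r)))
def convertLoop (n : Int) (res : List String) : List String :=
  if n = 0 then res
  else convertLoop (pvStep n).2 (res ++ [PySem.Int.toStr (pvStep n).1])
termination_by 2 * n.natAbs + (if n < 0 then 1 else 0)
decreasing_by exact pvStep_decr n (by assumption)

def convert_baseneg2 (n : Int) : String :=
  if n = 0 then "0"
  else PySem.Str.join "" ((convertLoop n []).reverse)

-- ===== PORT B =====

def convert_baseneg2_alt (n : Int) : String :=
  let k : Nat := PySem.Int.bitLength n + 4
  let mask : Int := PySem.Int.floordiv (4 ^ k - 1) 3 * 2   -- 0b1010...10 with k one-bits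
  PySem.Str.slice (PySem.Int.pyBin (PySem.Int.bxor (n + mask) mask)) (some 2) none

-- ===== PRECONDITION & SPEC =====
def Spec_convert_baseneg2 (n : Int) (out : String) : Prop := out = convert_baseneg2_alt n
instance (n : Int) (out : String) : Decidable (Spec_convert_baseneg2 n out) := by unfold Spec_convert_baseneg2; infer_instance

-- ===== CLAIM (what is proved, stated in full; the proofs are below) =====
def Claim_equal_convert_baseneg2 : Prop := ∀ (n : Int), Dom_convert_baseneg2 n → Spec_convert_baseneg2 n (convert_baseneg2 n)

-- ===== LEMMAS AND PROOFS =====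

-- reference: the negabinary digit list of n, least significant first
def pvDigits (n : Int) : List Int :=
  if n = 0 then [] else (pvStep n).1 :: pvDigits (pvStep n).2
termination_by 2 * n.natAbs + (if n < 0 then 1 else 0)
decreasing_by exact pvStep_decr n (by assumption)

-- value of a digit list read in base +2
def pvVal2 : List Int → Nat
  | [] => 0
  | d :: ds => d.toNat + 2 * pvVal2 ds

-- the odd mask 0b0101...01 (k ones) and the even mask 0b1010...10 (k ones)
def pvO : Nat → Nat
  | 0 => 0
  | k + 1 => 1 + 4 * pvO k

def pvM (k : Nat) : Nat := 2 * pvO k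

theorem pvStep_spec (n : Int) (h : n ≠ 0) :
    ((pvStep n).1 = 0 ∨ (pvStep n).1 = 1) ∧ n = -2 * (pvStep n).2 + (pvStep n).1 := by
  have hb := PySem.Int.mod_neg_bounds n (b := -2) (by norm_num)
  have he := PySem.Int.floordiv_mul_add_mod n (-2)
  unfold pvStep
  split_ifs with h1 <;> simp only <;> omega

theorem pvDigits_zero : pvDigits 0 = [] := by unfold pvDigits; simp

theorem pvDigits_cons (n : Int) (h : n ≠ 0) :
    pvDigits n = (pvStep n).1 :: pvDigits (pvStep n).2 := by
  rw [pvDigits]; simp [h]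

theorem pvDigits_mem (n : Int) : ∀ d ∈ pvDigits n, d = 0 ∨ d = 1 := by
  induction n using pvDigits.induct with
  | case1 => rw [pvDigits_zero]; simp
  | case2 n h ih =>
    rw [pvDigits_cons n h]
    intro d hd
    rcases List.mem_cons.mp hd with h1 | h1
    · subst h1; exact (pvStep_spec n h).1
    · exact ih d h1

theorem pvDigits_last (n : Int) (h : n ≠ 0) : (pvDigits n).getLast? = some 1 := by
  induction n using pvDigits.induct with
  | case1 => omega
  | case2 n hn ih =>
    rw [pvDigits_cons n hn]
    by_cases hq : (pvStep n).2 = 0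
    · have hs := pvStep_spec n hn
      rw [hq] at hs ⊢
      rw [pvDigits_zero]
      have : (pvStep n).1 = 1 := by omega
      simp [this]
    · rw [pvDigits_cons _ hq] at ih ⊢
      rw [List.getLast?_cons_cons]
      rw [← pvDigits_cons _ hq] at ih ⊢
      exact ih hq

theorem pvVal2_pos (ds : List Int) (h : ds.getLast? = some 1) : 0 < pvVal2 ds := by
  induction ds with
  | nil => simp at h
  | cons d ds ih =>
    cases ds with
    | nil => simp [List.getLast?] at h; subst h; simp [pvVal2]
    | cons e es =>
      have := ih (by rwa [List.getLast?_cons_cons] at h)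
      unfold pvVal2; omega

-- xor splits into low bit and remaining bits
theorem pvXor2 (a b : Bool) (m n : Nat) :
    (2 * m + a.toNat) ^^^ (2 * n + b.toNat) = 2 * (m ^^^ n) + (a != b).toNat := by
  have := Nat.xor_bit a m b n
  simpa [Nat.bit_val] using this

-- the key identity: (n + M) xor M reads off the negabinary digits of n in base 2
theorem pvEkey : ∀ k : Nat, ∀ n : Int, -(pvM k : Int) ≤ n → n ≤ (pvO k : Int) →
    ((n + (pvM k : Int)).toNat ^^^ pvM k) = pvVal2 (pvDigits n) := by
  intro k
  induction k with
  | zero =>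
    intro n h1 h2
    have hn : n = 0 := by simp [pvM, pvO] at h1 h2; omega
    subst hn
    rw [pvDigits_zero]
    simp [pvM, pvO, pvVal2]
  | succ k ih =>
    intro n h1 h2
    by_cases hn : n = 0
    · subst hn
      rw [pvDigits_zero]
      simp [pvVal2]
    · obtain ⟨hr, heq⟩ := pvStep_spec n hn
      obtain ⟨r, q, hrq⟩ : ∃ r q, pvStep n = (r, q) := ⟨_, _, rfl⟩
      rw [hrq] at hr heq
      dsimp only at hr heq
      have hO : (pvO (k+1) : Int) = 1 + 4 * (pvO k : Int) := by simp only [pvO]; push_cast; ring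
      have hM1 : (pvM (k+1) : Int) = 2 * (pvO (k+1) : Int) := by simp only [pvM]; push_cast; ring
      have hMk : (pvM k : Int) = 2 * (pvO k : Int) := by simp only [pvM]; push_cast; ring
      have hq1 : q ≤ (pvO (k+1) : Int) := by omega
      have hq2 : -(pvM k : Int) ≤ q := by omega
      obtain ⟨a, ha⟩ : ∃ a : Bool, r.toNat = a.toNat :=
        ⟨decide (r = 1), by rcases hr with h | h <;> simp [h]⟩
      have hA1 : (n + (pvM (k+1) : Int)).toNat = 2 * ((pvO (k+1) : Int) - q).toNat + a.toNat := by
        omega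
      have hM2 : (pvM (k+1) : Nat) = 2 * (pvO (k+1) : Nat) + Bool.false.toNat := by
        simp [pvM]
      rw [hA1, hM2, pvXor2]
      rw [pvDigits_cons n hn, hrq]
      dsimp only
      by_cases hq0 : q = 0
      · rw [hq0, pvDigits_zero]
        simp only [pvVal2]
        simp
        omega
      · obtain ⟨hr1, heq1⟩ := pvStep_spec q hq0
        obtain ⟨r1, m1, hrq1⟩ : ∃ r1 m1, pvStep q = (r1, m1) := ⟨_, _, rfl⟩
        rw [hrq1] at hr1 heq1
        dsimp only at hr1 heq1
        have hm1a : -(pvM k : Int) ≤ m1 := by omega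
        have hm1b : m1 ≤ (pvO k : Int) := by omega
        obtain ⟨b, hb⟩ : ∃ b : Bool, (1 - r1).toNat = b.toNat :=
          ⟨decide (r1 = 0), by rcases hr1 with h | h <;> simp [h]⟩
        have hA2 : ((pvO (k+1) : Int) - q).toNat = 2 * ((m1 + (pvM k : Int)).toNat) + b.toNat := by
          omega
        have hO2 : (pvO (k+1) : Nat) = 2 * (pvM k : Nat) + Bool.true.toNat := by
          simp [pvO, pvM]; omega
        rw [hA2, hO2, pvXor2, ih m1 hm1a hm1b]
        rw [pvDigits_cons q hq0, hrq1]
        dsimp only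
        simp only [pvVal2]
        have hbt : (b != true).toNat = r1.toNat := by
          cases b <;> rcases hr1 with h | h <;> simp [h] at hb ⊢
        rw [hbt]
        simp only [Bool.bne_false]
        omega

theorem pvLoop (n : Int) : ∀ res, convertLoop n res = res ++ (pvDigits n).map PySem.Int.toStr := by
  induction n using pvDigits.induct with
  | case1 =>
    intro res
    rw [convertLoop, pvDigits_zero]
    simp
  | case2 n h ih =>
    intro res
    rw [convertLoop, if_neg h, ih, pvDigits_cons n h]
    simp

-- accumulator lemma for Nat.toDigitsCore
theorem pvTdcAcc : ∀ (f n : Nat) (l : List Char),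
    Nat.toDigitsCore 2 f n l = Nat.toDigitsCore 2 f n [] ++ l := by
  intro f
  induction f with
  | zero => intro n l; simp [Nat.toDigitsCore]
  | succ f ih =>
    intro n l
    rw [Nat.toDigitsCore, Nat.toDigitsCore]
    by_cases h : n / 2 = 0
    · simp [h]
    · rw [if_neg h, if_neg h, ih (n / 2) ((n % 2).digitChar :: l), ih (n / 2) [(n % 2).digitChar]]
      simp

-- fuel irrelevance for Nat.toDigitsCore
theorem pvTdcFuel : ∀ (n f f' : Nat), n < f → n < f' →
    Nat.toDigitsCore 2 f n [] = Nat.toDigitsCore 2 f' n [] := by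
  intro n
  induction n using Nat.strong_induction_on with
  | _ n ih =>
    intro f f' hf hf'
    cases f with
    | zero => omega
    | succ g =>
      cases f' with
      | zero => omega
      | succ g' =>
        rw [Nat.toDigitsCore, Nat.toDigitsCore]
        by_cases h : n / 2 = 0
        · simp [h]
        · rw [if_neg h, if_neg h, pvTdcAcc g, pvTdcAcc g', ih (n / 2) (by omega) g g' (by omega) (by omega)]

theorem pvToDigits_step (n : Nat) (h : 2 ≤ n) :
    Nat.toDigits 2 n = Nat.toDigits 2 (n / 2) ++ [(n % 2).digitChar] := by
  unfold Nat.toDigits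
  rw [Nat.toDigitsCore]
  have h2 : ¬ n / 2 = 0 := by omega
  rw [if_neg h2, pvTdcAcc, pvTdcFuel (n / 2) n (n / 2 + 1) (by omega) (by omega)]

-- Nat.toDigits 2 renders pvVal2 back to the digit characters
theorem pvToDigits (ds : List Int) (hmem : ∀ d ∈ ds, d = 0 ∨ d = 1)
    (hlast : ds.getLast? = some 1) :
    Nat.toDigits 2 (pvVal2 ds) = (ds.map (fun d => if d = 1 then '1' else '0')).reverse := by
  induction ds with
  | nil => simp at hlast
  | cons d ds ih =>
    have hd : d = 0 ∨ d = 1 := hmem d (by simp)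
    cases ds with
    | nil =>
      simp [List.getLast?] at hlast
      subst hlast
      simp [pvVal2]
      rfl
    | cons e es =>
      have hlast' : (e :: es).getLast? = some 1 := by rwa [List.getLast?_cons_cons] at hlast
      have hpos : 0 < pvVal2 (e :: es) := pvVal2_pos _ hlast'
      have ihe := ih (fun x hx => hmem x (by simp [hx])) hlast'
      have hv : pvVal2 (d :: e :: es) = d.toNat + 2 * pvVal2 (e :: es) := rfl
      have h2 : 2 ≤ pvVal2 (d :: e :: es) := by rw [hv]; omega
      rw [pvToDigits_step _ h2]
      have hdiv : pvVal2 (d :: e :: es) / 2 = pvVal2 (e :: es) := by rw [hv]; omega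
      have hmod : pvVal2 (d :: e :: es) % 2 = d.toNat := by rw [hv]; omega
      rw [hdiv, hmod, ihe]
      simp only [List.map_cons, List.reverse_cons]
      congr 1
      rcases hd with h | h <;> subst h <;> rfl

theorem pvO_ge (k : Nat) (hk : 2 ≤ k) : 2 ^ k ≤ pvO k := by
  induction k with
  | zero => omega
  | succ k ih =>
    by_cases h2 : 2 ≤ k
    · have := ih h2
      simp only [pvO, pow_succ]
      omega
    · interval_cases k <;> simp [pvO] <;> omega

theorem pvMaskEq (k : Nat) : PySem.Int.floordiv ((4:Int) ^ k - 1) 3 * 2 = ((pvM k : Nat) : Int) := by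
  have h3 : (3 : Int) * (pvO k : Int) = 4 ^ k - 1 := by
    induction k with
    | zero => simp [pvO]
    | succ k ih =>
      simp only [pvO]
      push_cast
      rw [pow_succ]
      push_cast at ih
      linarith
  rw [PySem.Int.floordiv_eq_ediv_of_pos (by norm_num), ← h3,
    Int.mul_ediv_cancel_left _ (by norm_num)]
  simp [pvM]
  ring

theorem pv_main (n : Int) : convert_baseneg2 n = convert_baseneg2_alt n := by
  by_cases hn : n = 0
  · subst hn; decide
  · unfold convert_baseneg2_alt
    dsimp only
    have hbl : n.natAbs < 2 ^ PySem.Int.bitLength n := PySem.Int.lt_two_pow_bitLength n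
    have h2k : 2 ^ (PySem.Int.bitLength n + 4) ≤ pvO (PySem.Int.bitLength n + 4) :=
      pvO_ge _ (by omega)
    have hpow : (2:Nat) ^ PySem.Int.bitLength n ≤ 2 ^ (PySem.Int.bitLength n + 4) :=
      Nat.pow_le_pow_right (by norm_num) (by omega)
    have hOb : n.natAbs < pvO (PySem.Int.bitLength n + 4) :=
      lt_of_lt_of_le hbl (le_trans hpow h2k)
    have hMO : (pvM (PySem.Int.bitLength n + 4) : Int) = 2 * (pvO (PySem.Int.bitLength n + 4) : Int) := by
      simp only [pvM]; push_cast; ring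
    have hb1 : -(pvM (PySem.Int.bitLength n + 4) : Int) ≤ n := by omega
    have hb2 : n ≤ (pvO (PySem.Int.bitLength n + 4) : Int) := by omega
    rw [pvMaskEq]
    rw [PySem.Int.bxor_of_nonneg (by omega) (by omega)]
    simp only [Int.toNat_natCast]
    rw [pvEkey _ n hb1 hb2]
    rw [convert_baseneg2, if_neg hn, pvLoop n []]
    apply String.ext
    rw [PySem.Str.toList_join]
    simp only [List.nil_append, List.map_reverse, List.map_map]
    have hsep : ("" : String).toList = [] := rfl
    rw [hsep]
    have hmap : (pvDigits n).map (String.toList ∘ PySem.Int.toStr)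
        = (pvDigits n).map (fun d => [if d = 1 then '1' else '0']) := by
      apply List.map_congr_left
      intro d hd
      rcases pvDigits_mem n d hd with h | h <;> subst h <;> decide
    rw [hmap]
    have hmap2 : (pvDigits n).map (fun d => [if d = 1 then '1' else '0'])
        = ((pvDigits n).map (fun d => if d = 1 then '1' else '0')).map (fun c => [c]) := by
      rw [List.map_map]; rfl
    rw [hmap2, ← List.map_reverse, PySem.Chars.join_nil_singletons]
    -- right-hand side: toList of the sliced bin string
    rw [PySem.Str.toList_slice]
    unfold PySem.Int.pyBin PySem.Int.toBinChars0b
    rw [if_neg (by omega)]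
    rw [String.toList_ofList]
    simp only [PySem.Chars.slice]
    rw [show (2:Int) = ((2:Nat):Int) from rfl, PySem.List.slice_from_natCast]
    rw [Int.toNat_natCast]
    rw [pvToDigits (pvDigits n) (pvDigits_mem n) (pvDigits_last n hn)]
    rfl

-- ===== VERDICT (by name: the statement is the Claim_ definition above) =====
theorem convert_baseneg2_spec : Claim_equal_convert_baseneg2 := by
  intro n _
  unfold Spec_convert_baseneg2
  exact pv_main n
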